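/-
  WHAT THE GROUPS OF THE STATEMENT LAYER SHARE (imported by every Vorbis/Spec/<Group>.lean of the decoder; the pilot's groups —
  Runtime, Libc, LibcMisc, LibcSort, Libm, Leaves, Leaves2 — need only Basic.lean). ONE definition of every notion that two
  writers had defined independently:

      LiveIn.mono / LiveIn.blockLive / ShadowPre.call      (S2)  lemmas about Basic.lean's vocabulary
      check_site                                           (S2's form; S8's was the instance `hb := rfl`)  a `check_<addr>` goal from a `Site`
      LiveSet others frames                                (S9)  the live set of a program point
      LiveBytes others frames a n                          (S8 = S9)  BYTEWISE liveness: `.of_liveIn .of_block .of_inLive .inLive .sub .byte .site .byte_where .where_ .accSmall`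
      ObjLive others frames f                              (S1)  OB1 at the shadow level = `LiveBytes others frames f 1808` (`ObjLive.iff_liveBytes`)
      Apart Bs                                             (S3)  the blocks of a list are pairwise disjoint
      clBlock mem c / BookApart mem f c                    (S3; S6's and S9's `BookOff` had `lengths` for dense books only: the CALLEE's form wins)  the book's blocks are apart from `*f`
      s32 w / s64 w                                        (S9; S6's `i32` was the same)  the SIGNED value of the low half / of a register, `(Word.part _ w).toInt`
      argInt r / argU32 r                                  (S3; S2's `arg32 x` was `argInt x`)  a 32-bit argument as `sint32 (r % 2^32)` / `r % 2^32`
      arg32 u r / IsNeg32 u r k                            (S8)  the unsigned 32-bit argument in register `r` of state `u`: IRREDUCIBLE, unfolded by `arg32_def` (`vspec`)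
      sext32_toNat arg32_sext IsNeg32.sext arg32_sar add_neg_mul4 add_mul4        (S8)  `movsxd` / `sar` / `lea [p + x*4]` of an `int` argument, as numbers
      toNat_sext32 toInt_of_lt toNat_ofNat32 r8_lea toNat_sub32 toNat_lea32 readLE_field      (S1)  the bit-level forms of the allocators' walks, as numbers
      stackObj_range live_others liveIn_reframe            (S9)  a live range off the stack region is live under any list of active frames
      StackObj others frames p n                           (S6 = S9)  a live object of a caller's stack frame (the out-pointers)
      RunBlk Ar len                                        (S6 `RunBlk` = S9 `Top.DBlk len A`)  the block predicate of a run from P5 on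
      ReaderEnv others frames Blk len f                    (S2; moved here verbatim so that `Hand.readerEnv` can be stated)
      Hand others frames len A f                           THE HAND-OVER CARRIER (memory-independent): `*f` / IN / OUT inside ONE live object, the six globals
                                                           objects of `others`, `arenaText`, `outside`; `.mono .reframe .readerEnv .objLive .offText .g_log2 .g_range
                                                           .g_db .g_crc .g_vorbis .g_ogg .runBlk_ok .offStack .offGap`; `liveIn_of_arenaBlk`
                                                           (S5 `StartDecoder.HandOK` = `Hand` ∧ `objOut`; the decode-time invariant: Vorbis/Spec/DecodeInv.lean)
      Consts mem                                           (S9 `Top.ImageConsts`)  SH7 for `log2_4` and `range_list`: the memory-dependent shared facts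
      Separated.bookApart                                  `BookApart` of every codebook is a THEOREM of CONFIG ∧ SEP (the `codeword_lengths` blocks are in `ConfigOK.Reads`)
-/
import Vorbis.Spec.Basic
import Vorbis.Spec.Leaves2
import Vorbis.ArenaShadow
import Vorbis.Invariant
namespace Vorbis.Spec
open X86 X86.User Asan

/-! ### Lemmas about the vocabulary of Vorbis/Spec/Basic.lean -/

/-- A live range stays live when the lists of live objects grow (a protected frame was pushed, a block was allocated). -/
theorem _root_.Vorbis.LiveIn.mono {others others' : List Obj} {frames frames' : List (Nat × FrameLayout)} {a n : Nat}
    (h : LiveIn others frames a n) (hsub : ∀ o, o ∈ stackObjs frames ++ others → o ∈ stackObjs frames' ++ others') :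
    LiveIn others' frames' a n := by
  obtain ⟨o, ho, h1, h2⟩ := h
  exact ⟨o, hsub o ho, h1, h2⟩

/-- The block of a live range is live in the live set of the shadow invariant. -/
theorem _root_.Vorbis.LiveIn.blockLive {others : List Obj} {frames : List (Nat × FrameLayout)} {a n : Nat} (h : LiveIn others frames a n) :
    (Block.mk a n).live (Live (stackObjs frames ++ others)) := by
  obtain ⟨o, ho, h1, h2⟩ := h
  rw [Block.live_iff]
  intro x hx
  have hx' : a ≤ x ∧ x < a + n := hx
  refine ⟨o, ho, ?_⟩
  unfold Obj.Bytes
  omega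

/-- **THE SHADOW CLAUSE OF A CALLEE'S PRECONDITION, from the caller's**: the caller was entered at `u` with `ShadowPre`, has
written no shadow byte since (`hun`: `by v_untouched`), and stands at `s`, the callee's first instruction, with its stack pointer
below its own entry stack pointer (it pushed at least the return address). -/
theorem _root_.Vorbis.ShadowPre.call {others : List Obj} {frames : List (Nat × FrameLayout)} {u s : State} (h : ShadowPre others frames u)
    (hun : ShadowUntouched u.mem s.mem) (hle : (s.reg .rsp).toNat ≤ (u.reg .rsp).toNat)
    (h8 : (s.reg .rsp).toNat % 8 = 0) (hlo : 0x700000 ≤ (s.reg .rsp).toNat + 8) : ShadowPre others frames s := by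
  refine ⟨?_, h.offText⟩
  have hinv := ShadowInv.untouched h.inv hun
  exact hinv.lower (by omega) (by omega) hlo

/-- **A `check_<addr>` goal from a `Site`** (the result of every USE lemma of the predicate files): the check is called with a
register whose value is the number `a`; no store since the function's entry went to the shadow. -/
theorem check_site {others : List Obj} {frames : List (Nat × FrameLayout)} {top : Nat} {mem mem' : Mem}
    (hinv : ShadowInv others frames top mem) (hun : ShadowUntouched mem mem') {a n : Nat}
    (hs : Site (Live (stackObjs frames ++ others)) a n) {b : Word} (hb : b.toNat = a) : AccSmall n mem' b := by
  have hinv' := hinv.untouched hun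
  refine ⟨hinv'.sealed, ?_⟩
  rw [hb]
  exact hs.acc hinv'.covers

/-! ### Bytewise liveness -/

/-- **The live set of a program point**: the bytes of the stack objects of the active protected frames and of `others`. -/
abbrev LiveSet (others : List Obj) (frames : List (Nat × FrameLayout)) : Nat → Prop :=
  Asan.Live (stackObjs frames ++ others)

/-- **The `n` bytes at `a` are live bytes** of the objects of the shadow invariant (stack objects of the active protected
frames, and `others`). The bytewise form of `LiveIn` (which asks for ONE object): what an allocated block of the decoder
invariant gives (`BlkLive`), and all a check site needs. -/
def LiveBytes (others : List Obj) (frames : List (Nat × FrameLayout)) (a n : Nat) : Prop :=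
  InLive (LiveSet others frames) a n

namespace LiveBytes
variable {others : List Obj} {frames : List (Nat × FrameLayout)} {top a n : Nat} {mem mem' : Mem}

/-- Bytes inside one live object are live bytes. -/
theorem of_liveIn (h : LiveIn others frames a n) : LiveBytes others frames a n := by
  obtain ⟨o, ho, h1, h2⟩ := h
  intro i hi
  exact ⟨o, ho, by unfold Obj.Bytes; omega⟩

/-- A live block is live byte by byte (the bridge from `BlkLive`: `(hL B hB)`). -/
theorem of_block {B : Block} (h : B.live (LiveSet others frames)) (h1 : B.base ≤ a) (h2 : a + n ≤ B.base + B.size) :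
    LiveBytes others frames a n :=
  InLive.sub h a n h1 h2

/-- From the `InLive` of the predicate files (`PairDown.inLive0`, `floats_inLive` …). -/
theorem of_inLive (h : InLive (Live (stackObjs frames ++ others)) a n) : LiveBytes others frames a n := h

/-- To the `InLive` the predicate files take (`Mdct.site_f32_down`, `Site.of_inLive`). -/
theorem inLive (h : LiveBytes others frames a n) : InLive (Live (stackObjs frames ++ others)) a n := h

/-- A sub-range of a live range. -/
theorem sub (h : LiveBytes others frames a n) (b k : Nat) (h1 : a ≤ b) (h2 : b + k ≤ a + n) : LiveBytes others frames b k :=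
  InLive.sub h b k h1 h2

/-- One live byte lies in one live object. -/
theorem byte (h : LiveBytes others frames a n) (x : Nat) (h1 : a ≤ x) (h2 : x < a + n) : LiveIn others frames x 1 := by
  have hx := h (x - a) (by omega)
  have e : a + (x - a) = x := by omega
  rw [e] at hx
  obtain ⟨o, ho, hb⟩ := hx
  unfold Obj.Bytes at hb
  exact ⟨o, ho, by omega, by omega⟩

/-- **Everything a walk needs to know about where a live range is**, as one arithmetic fact for `u_omega` (the bytewise
`LiveIn.where_`): inside the data space, off the image's text, off the stack below `top`. `htop`: the function has stack room
(`AtEntry.room`: `700000H + frame ≤ rsp`, and `top = rsp + 8`). -/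
theorem where_ (h : LiveBytes others frames a n) (hinv : ShadowInv others frames top mem)
    (hoff : ∀ o, o ∈ others → L.textHi ≤ o.base) (hn : 0 < n) (htop : 0x700000 < top) :
    0x119d40 ≤ a ∧ a + n ≤ 0xC00000 ∧ (top ≤ a ∨ a + n ≤ 0x700000 ∨ 0x800000 ≤ a) := by
  have hfirst := (h.byte a (Nat.le_refl a) (by omega)).where_ hinv hoff (by decide)
  have hlast := (h.byte (a + n - 1) (by omega) (by omega)).where_ hinv hoff (by decide)
  refine ⟨by omega, by omega, ?_⟩
  by_cases hlow : a < 0x700000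
  · by_cases hcross : 0x700000 < a + n
    · have hmid := (h.byte 0x700000 (by omega) (by omega)).where_ hinv hoff (by decide)
      omega
    · omega
  · omega

/-- **The small check of bytes inside a live range passes**, in any memory whose shadow is that of the invariant's (the bytewise
`LiveIn.accSmall`). -/
theorem accSmall (h : LiveBytes others frames a n) (hinv : ShadowInv others frames top mem)
    (hun : ShadowUntouched mem mem') (b : Word) (k : Nat) (hk : 1 ≤ k) (h1 : a ≤ b.toNat) (h2 : b.toNat + k ≤ a + n) :
    AccSmall k mem' b := by
  have hinv' := hinv.untouched hun
  exact ⟨hinv'.sealed, hinv'.shadow.covers.accessibleSmall (by omega) (h.sub b.toNat k h1 h2)⟩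

/-- A check site. -/
theorem site (h : LiveBytes others frames a n) (b k : Nat) (h1 : a ≤ b) (h2 : b + k ≤ a + n) (hk : 1 ≤ k) :
    Site (LiveSet others frames) b k :=
  Site.of_inLive (h.sub b k h1 h2) hk

/-- Where ONE live byte is: inside the data space, off the image's text, off the stack below `top`. -/
theorem byte_where (hinv : ShadowInv others frames top mem) (hoff : ∀ o, o ∈ others → L.textHi ≤ o.base) {x : Nat}
    (hx : LiveSet others frames x) : 0x119d40 ≤ x ∧ x < 0xC00000 ∧ (top ≤ x ∨ x < 0x700000 ∨ 0x800000 ≤ x) := by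
  obtain ⟨o, ho, hb⟩ := hx
  unfold Obj.Bytes at hb
  have hl : LiveIn others frames x 1 := ⟨o, ho, by omega, by omega⟩
  have := hl.where_ hinv hoff (by omega)
  omega

end LiveBytes

/-- **OB1 for a contract over the shadow layer**: every byte of the 1808 bytes of `*f` is live, in the live set of
`ShadowInv others frames …`. Bytewise, so that a caller that knows `*f` as ONE object (`LiveIn`) and a caller that knows it
through the invariant (`OB1 Blk f`, `BlkLive Blk Live`) can both supply it. (`ObjLive.of_liveIn`, `.of_ob1`, `.cons`, `.drop`,
`.site`, `.accSmall`, `.where_`: Vorbis/Spec/Alloc.lean.) -/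
def ObjLive (others : List Obj) (frames : List (Nat × FrameLayout)) (f : Nat) : Prop :=
  (objBlock f).live (Live (stackObjs frames ++ others))

/-- `ObjLive` is `LiveBytes` of the 1808 bytes of `*f`. -/
theorem ObjLive.iff_liveBytes {others : List Obj} {frames : List (Nat × FrameLayout)} {f : Nat} :
    ObjLive others frames f ↔ LiveBytes others frames f Off.sizeof.stb_vorbis :=
  Iff.rfl

/-! ### Live ranges under another list of active protected frames -/

/-- A stack object of an active protected frame lies in the stack region. -/
theorem stackObj_range {others : List Obj} {frames : List (Nat × FrameLayout)} {top : Nat} {mem : Mem}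
    (hinv : ShadowInv others frames top mem) {o : Obj} (ho : o ∈ stackObjs frames) :
    0x700000 ≤ o.base ∧ (o.base + o.size + 7) / 8 * 8 ≤ 0x800000 := by
  obtain ⟨bF, hbF, g1, g2⟩ := ShadowInv.stackObj_gran hinv.stack ho
  obtain ⟨_, a8, atop, ahi, _⟩ := hinv.stack.active bF hbF
  have hlo := hinv.stack.lo
  have e1 : o.gLo = o.base / 8 := rfl
  have e2 : o.gHi = (o.base + o.size + 7) / 8 := rfl
  omega

/-- A live byte off the stack region is a byte of one of the `others`. -/
theorem live_others {others : List Obj} {frames : List (Nat × FrameLayout)} {top : Nat} {mem : Mem}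
    (hinv : ShadowInv others frames top mem) {x : Nat} (hx : LiveSet others frames x)
    (hoff : x < 0x700000 ∨ 0x800000 ≤ x) : ∃ o, o ∈ others ∧ o.Bytes x := by
  obtain ⟨o, ho, hb⟩ := hx
  rcases List.mem_append.mp ho with hs | hoth
  · have hr := stackObj_range hinv hs
    unfold Obj.Bytes at hb
    omega
  · exact ⟨o, hoth, hb⟩

/-- A one-object live range off the stack region lies in one of the `others`: it is live under any list of frames. -/
theorem liveIn_reframe {others : List Obj} {frames frames' : List (Nat × FrameLayout)} {top : Nat} {mem : Mem}
    (hinv : ShadowInv others frames top mem) {a n : Nat} (h : LiveIn others frames a n) (hn : 0 < n)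
    (hoff : a + n ≤ 0x700000 ∨ 0x800000 ≤ a) : LiveIn others frames' a n := by
  obtain ⟨o, ho, h1, h2⟩ := h
  rcases List.mem_append.mp ho with hs | hoth
  · have hr := stackObj_range hinv hs
    omega
  · exact ⟨o, List.mem_append_right _ hoth, h1, h2⟩

/-- **A live object of a caller's stack frame**: the `n` bytes at `p` lie inside ONE live object, in the stack region. Every
out-pointer of the decode-time functions is one (`&len`, `&left`, `&right`, `&mode`, `&left_end`, `&right_end`, `&ch`, `&chan`,
`&error`, `&a`; vorbis_decode_packet_rest's `len` and `p_left`). Being in the stack region, it meets no block of the run's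
predicate (`DecodeInv.offStack`): a store to it is `StoreOK.off`. -/
def StackObj (others : List Obj) (frames : List (Nat × FrameLayout)) (p n : Nat) : Prop :=
  LiveIn others frames p n ∧ 0x700000 ≤ p ∧ p + n ≤ 0x800000

/-! ### THE HAND-OVER CARRIER: what every callee's precondition needs besides the invariant

The decoder invariant gives BYTEWISE liveness (`BlkLive Blk Live`). The pilot's callees (`error`, `memcpy`, `memset`, `ilog` …) ask
`LiveIn` — "inside ONE live object" —, the allocators ask `L.textHi ≤ A.B`, several callees ask globals AS OBJECTS of `others`, and
the laws of the run's block predicate need the fixed objects outside the arena's buffer. ONE structure carries these facts from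
stb_vorbis_open_memory through start_decoder (`StartDecoder.HandOK` = `Hand` ∧ "`*f` lies outside the arena": the stack object `p`)
into decode time (`DecodeInv` = … ∧ `Hand` ∧ "`*f` is a setup block of the arena"). NOTHING of it depends on the memory. The leaf
Specs keep their own minimal forms (`ArenaPre`, `ReaderEnv`, `ObjLive`, `LiveBytes`): the projections below derive them. -/

/-- **The block predicate of a run from P5 on** (Vorbis/Invariant/Blk.lean, "WHICH `Blk` WHEN"): the arena's setup blocks — the
arena copy `*f` among them — and the fixed objects (input, output, the six globals). -/
abbrev RunBlk (Ar : Arena) (len : Nat) : Block → Prop := runBlk Ar (fixedBlocks len)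

/-- **What a packet-reading call needs besides `Bits` and the shadow clause** (S2's carrier; the precondition of every Spec of
Vorbis/Spec/Reader.lean) — nothing of it depends on the memory, so a caller that has it for its own `others`, `frames`, `Blk`,
`len` and object address passes it on unchanged. From the hand-over carrier: `Hand.readerEnv`. -/
structure ReaderEnv (others : List Obj) (frames : List (Nat × FrameLayout)) (Blk : Block → Prop) (len : Nat) (f : Nat) :
    Prop where
  /-- every allocated block is live (`h.env.live` of a program point, with `Live := Asan.Live (stackObjs frames ++ others)`) -/
  live : BlkLive Blk (Live (stackObjs frames ++ others))
  /-- `*f` lies inside ONE live object: the stack object `p` of stb_vorbis_open_memory, or the arena block of the copy -/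
  obj : LiveIn others frames f Off.sizeof.stb_vorbis
  /-- the input lies inside ONE live object -/
  inp : 0 < len → LiveIn others frames IN len

/-- **THE HAND-OVER CARRIER** for the live non-stack objects `others`, the active protected frames `frames`, the input's length
`len`, the ghost arena `A` and the decoder object at `f`:
* `obj`, `inp`, `out`: `*f`, the input, the output each lie inside ONE live object (`error.spec`, getn's `memcpy`, the readers'
  `ReaderEnv`, copy_frame's target);
* `globals`: the six registered globals are OBJECTS of `others` (`ilog.spec` asks `log2_4.obj ∈ others`, draw_line
  `inverse_db_table.obj ∈ others`: the object form of SH5);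
* `arenaText`: the arena lies above the image's text (the allocators' `ArenaPre.offText`: a new block satisfies `ShadowPre.offText`);
* `outside`: the fixed objects (input, output, globals) lie outside the arena's buffer `[A.B, A.B + A.L)` — the `hout` of
  `ArenaOK.runBlk_ok`, i.e. what makes the run's block predicate lawful (`Hand.runBlk_ok`), and why no fixed object meets the
  arena's free gap.
Only `B` and `L` of the arena are mentioned: they never change (`Arena.Extends`), so the carrier survives every allocation
(`Hand.mono`). WHERE `*f` IS is not part of it: at start_decoder time `*f` is the stack object `p`, outside the arena
(`StartDecoder.HandOK.objOut`); at decode time it is a setup block of the arena (`DecodeInv.obj`). -/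
structure Hand (others : List Obj) (frames : List (Nat × FrameLayout)) (len : Nat) (A : Arena) (f : Nat) : Prop where
  /-- `*f` lies inside ONE live object -/
  obj : LiveIn others frames f Off.sizeof.stb_vorbis
  /-- the input lies inside ONE live object -/
  inp : 0 < len → LiveIn others frames IN len
  /-- the output buffer lies inside ONE live object -/
  out : LiveIn others frames blockOUT.base blockOUT.size
  /-- the six registered globals are objects of the live list -/
  globals : ∀ o, o ∈ Vorbis.Globals.objs → o ∈ others
  /-- the arena lies above the image's text -/
  arenaText : L.textHi ≤ A.B
  /-- the fixed objects lie outside the arena's buffer -/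
  outside : ∀ C, C ∈ fixedBlocks len → C.base + C.size ≤ A.B ∨ A.B + A.L ≤ C.base

/-- **SH7 for the two tables of the image that the decoder reads as constants** (the memory-DEPENDENT facts every group shares):
`log2_4` (the value of `ilog`) and `range_list` (`range_list[mult − 1]` decides the width of two `get_bits` in
vorbis_decode_packet_rest). The other four globals are never read for a value that matters (`inverse_db_table`: floats;
`ogg_page_header`, `vorbis`: compared, the result only steers the parse; `crc_table`: written by crc32_init before it is read). -/
structure Consts (mem : Mem) : Prop where
  /-- the sixteen bytes of `log2_4` -/
  log2 : Log2_4In mem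
  /-- `range_list` = {256, 128, 86, 64} -/
  range : RangeListOK mem Vorbis.Globals.range_list.beg

namespace Hand
variable {others others' : List Obj} {frames frames' : List (Nat × FrameLayout)} {len f : Nat} {A A' : Arena}

/-- **The carrier after an allocation / with more active frames**: the ghost arena grew (`B`, `L` unchanged: `Arena.Extends`), the
object list got longer, a protected frame was pushed: nothing of it is lost. -/
theorem mono (h : Hand others frames len A f) (hext : A.Extends A') (hsub : ∀ o, o ∈ others → o ∈ others')
    (hfr : ∀ o, o ∈ stackObjs frames → o ∈ stackObjs frames') : Hand others' frames' len A' f := by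
  have hall : ∀ o, o ∈ stackObjs frames ++ others → o ∈ stackObjs frames' ++ others' := by
    intro o ho
    rcases List.mem_append.mp ho with hs | hoth
    · exact List.mem_append_left _ (hfr o hs)
    · exact List.mem_append_right _ (hsub o hoth)
  refine ⟨h.obj.mono hall, fun hl => (h.inp hl).mono hall, h.out.mono hall, fun o ho => hsub o (h.globals o ho), ?_, ?_⟩
  · rw [hext.B]
    exact h.arenaText
  · rw [hext.B, hext.L]
    exact h.outside

/-- **The carrier under ANOTHER list of active frames** (a protected frame was popped, or the list is the callee's): `*f` — off the
stack region: an arena block — the input and the output lie in objects of `others`, whatever the frames are. `hinv`: the shadow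
layer for the OLD frames (it says where stack objects are). -/
theorem reframe {top : Nat} {mem : Mem} (h : Hand others frames len A f) (hinv : ShadowInv others frames top mem)
    (hlen : len ≤ 0x1FF000) (hobj : f + Off.sizeof.stb_vorbis ≤ 0x700000 ∨ 0x800000 ≤ f) : Hand others frames' len A f := by
  refine ⟨liveIn_reframe hinv h.obj (by simp only [voff]; omega) hobj, ?_, ?_, h.globals, h.arenaText, h.outside⟩
  · intro hl
    exact liveIn_reframe hinv (h.inp hl) hl (by simp only [voff]; omega)
  · exact liveIn_reframe hinv h.out (by simp only [blockOUT]; omega) (by simp only [blockOUT]; omega)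

/-- S2's `ReaderEnv` (the precondition of every packet reader), given that the allocated blocks are live (`h.env.live`). -/
theorem readerEnv {Blk : Block → Prop} (h : Hand others frames len A f)
    (hl : BlkLive Blk (Live (stackObjs frames ++ others))) : ReaderEnv others frames Blk len f :=
  ⟨hl, h.obj, h.inp⟩

/-- S1's `ObjLive` (OB1 at the shadow level: the allocators' precondition). -/
theorem objLive (h : Hand others frames len A f) : ObjLive others frames f :=
  h.obj.blockLive

/-- The allocators' `ArenaPre.offText`, under its own name. -/
theorem offText (h : Hand others frames len A f) : L.textHi ≤ A.B :=
  h.arenaText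

/-- A descriptor of the table gives an object of the live list. -/
theorem desc (h : Hand others frames len A f) {d : GlobalDesc} (hd : d ∈ Vorbis.Globals.descs) : d.obj ∈ others := by
  apply h.globals
  unfold Vorbis.Globals.objs
  exact List.mem_reverse.mpr (List.mem_map.mpr ⟨d, hd, rfl⟩)

/-- SH5 for `range_list`, as an object (`vorbis_decode_packet_rest`'s two loads). -/
theorem g_range (h : Hand others frames len A f) : Vorbis.Globals.range_list.obj ∈ others :=
  h.desc (by simp only [Vorbis.Globals.descs, List.mem_cons, true_or, or_true])

/-- SH5 for `log2_4`, as an object (`ilog.spec`). -/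
theorem g_log2 (h : Hand others frames len A f) : Vorbis.Globals.log2_4.obj ∈ others :=
  h.desc (by simp only [Vorbis.Globals.descs, List.mem_cons, true_or, or_true])

/-- SH5 for `inverse_db_table`, as an object (`draw_line.spec`, `do_floor.spec`). -/
theorem g_db (h : Hand others frames len A f) : Vorbis.Globals.inverse_db_table.obj ∈ others :=
  h.desc (by simp only [Vorbis.Globals.descs, List.mem_cons, true_or, or_true])

/-- SH5 for `crc_table`, as an object (`crc32_init`). -/
theorem g_crc (h : Hand others frames len A f) : Vorbis.Globals.crc_table.obj ∈ others :=
  h.desc (by simp only [Vorbis.Globals.descs, List.mem_cons, true_or, or_true])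

/-- SH5 for `vorbis`, as an object (`vorbis_validate`). -/
theorem g_vorbis (h : Hand others frames len A f) : Vorbis.Globals.vorbis.obj ∈ others :=
  h.desc (by simp only [Vorbis.Globals.descs, List.mem_cons, true_or])

/-- SH5 for `ogg_page_header`, as an object (`capture_pattern`). -/
theorem g_ogg (h : Hand others frames len A f) : Vorbis.Globals.ogg_page_header.obj ∈ others :=
  h.desc (by simp only [Vorbis.Globals.descs, List.mem_cons, true_or, or_true])

/-- **The laws of the run's block predicate** (`ArenaOK.runBlk_ok` with `fixed_ok` and `outside`). -/
theorem runBlk_ok {mem : Mem} {p : Nat} (h : Hand others frames len A f) (hA : ArenaOK A others mem p)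
    (hlen : len ≤ 0x1FF000) : BlkOK (RunBlk A len) :=
  hA.runBlk_ok (fixed_ok len hlen) h.outside

/-- **No block of the run's predicate meets the stack region**: a setup block by AR1x, a fixed object by inspection. -/
theorem offStack {mem : Mem} {p : Nat} (_h : Hand others frames len A f) (hA : ArenaOK A others mem p)
    (hlen : len ≤ 0x1FF000) (B : Block) (hB : RunBlk A len B) : B.base + B.size ≤ 0x700000 ∨ 0x800000 ≤ B.base := by
  rcases hB with hs | hm
  · exact hA.blk_off_stack hs
  · exact fixed_off_stack len hlen B hm

/-- **No block of the run's predicate meets the free part `[B + S, B + L)` of the arena** (where the temp blocks live): the setup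
blocks end at `B + S` (`ArenaOK.block_range`), the fixed objects lie outside the arena (`outside`). -/
theorem offGap {mem : Mem} {p : Nat} (h : Hand others frames len A f) (hA : ArenaOK A others mem p)
    (B : Block) (hB : RunBlk A len B) : B.base + B.size ≤ A.B + A.S ∨ A.B + A.L ≤ B.base := by
  rcases hB with hs | hm
  · left
    have hr := hA.block_range (p := B.base) (n := B.size) hs
    have hl := le_r8 B.size
    omega
  · have ho := h.outside B hm
    have h2 := hA.AR2
    omega

/-- **A setup block of the arena lies inside ONE live object** (AR6: the block IS an object of `others`). How `*f` (the arena
copy) and the sample buffers get the `LiveIn` that `error`, `memset`, `draw_line`, the readers ask for. -/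
theorem _root_.Vorbis.Spec.liveIn_of_arenaBlk {mem : Mem} {p : Nat} (hA : ArenaOK A others mem p) {B : Block} (hB : A.Blk B) :
    LiveIn others frames B.base B.size := by
  have hb : A.Block B.base B.size := hB
  have hmem := hA.AR6 _ hb.obj_mem
  exact ⟨_, List.mem_append_right _ hmem, Nat.le_refl _, Nat.le_refl _⟩

end Hand

/-! ### Disjoint blocks -/

/-- The blocks of the list are pairwise disjoint (CONTRACTS: "these blocks disjoint from `*c` and from each other"). For a list
written out, `simp only [Apart, List.pairwise_cons, List.mem_cons, …]` turns it into the conjunction of `Block.disjoint`s. -/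
def Apart (Bs : List Block) : Prop := Bs.Pairwise Block.disjoint

/-! ### The blocks of a codebook that must be apart from `*f` -/

/- `clBlock mem c` — `codeword_lengths` of the book: `N(c)` bytes (dense: `entries`, K3n; sparse: `se`, K3s / K3t) — is
`Vorbis.Codebook.clBlock` (Vorbis/Codebook/Book.lean: the invariant's `ConfigOK.Reads.lengths` names it); the Specs of this layer
write it unqualified. -/
export Vorbis.Codebook (clBlock)

/-- **What `*f` must not meet** for a decode through the book at `c` (CONTRACTS 53: "`*f`, `*c` and `c`'s blocks disjoint"),
reduced to what the code needs: every store of the scalar decode goes into `*f`; afterwards the code re-reads fields of `*c`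
(`book`), `sorted_values[x]` whose VALUE indexes `codeword_lengths` (`sv`, K4c), and — the linear search only, 0x10d891 —
`codeword_lengths[i]` a second time, for `valid_bits -= len` after the length compared with `valid_bits` (`lengths`: V1 needs
the two reads to agree; the linear search runs only with `codewords ≠ NULL`, i.e. for a dense book, but the clause is stated
for every book: S6's and S7's invariants carry it in this form). `codewords`, `sorted_codewords`, `multiplicands` may hold anything. -/
structure BookApart (mem : Mem) (f c : Nat) : Prop where
  book : (Codebook.block c).disjoint (objBlock f)
  sv : 1 ≤ Codebook.sorted_entries mem c → (Codebook.svBlock mem c).disjoint (objBlock f)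
  lengths : (clBlock mem c).disjoint (objBlock f)

/-- `BookApart` follows the memory as long as the fields of `*c` read the same (the blocks are named by its pointers). -/
theorem BookApart.frame {mem mem' : Mem} {f c : Nat} (h : BookApart mem f c) (e : Codebook.SameFields mem mem' c) :
    BookApart mem' f c := by
  obtain ⟨hb, hv, hl⟩ := h
  have eN : Codebook.N mem' c = Codebook.N mem c := e.N
  refine ⟨hb, ?_, ?_⟩
  · intro hse
    rw [e.sorted_entries] at hse
    have := hv hse
    unfold Codebook.svBlock at this ⊢
    rw [e.sorted_values, e.sorted_entries]
    exact this
  · unfold Codebook.clBlock at hl ⊢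
    rw [e.codeword_lengths, eN]
    exact hl

/-- **`BookApart` OF EVERY CODEBOOK IS A THEOREM OF THE INVARIANT**: CONFIG and the separation clause give it (the struct lies
inside the codebooks block, the `sorted_values` and `codeword_lengths` blocks are among `ConfigOK.Reads`). No decode-time
precondition carries `∀ i, BookApart …` as a field of its own. -/
theorem _root_.Vorbis.Separated.bookApart {Blk : Block → Prop} {mem : Mem} {f : Nat} (hsep : Separated Blk mem f)
    (h : ConfigOK Blk mem f) (i : Nat) (hi : (i : Int) < stb_vorbis.codebook_count mem f) :
    BookApart mem f (stb_vorbis.codebooks_at mem f i) := by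
  refine ⟨?_, ?_, ?_⟩
  · have hd := hsep.obj _ ConfigOK.Reads.codebooks
    have hin := h.cb0.cb_in i hi
    simp only [vblock] at hd hin ⊢
    omega
  · intro hse
    exact hsep.obj _ (ConfigOK.Reads.sorted_values i hi hse)
  · exact hsep.obj _ (ConfigOK.Reads.lengths i hi)

/-- The same under the name S9 used (`Top.BookOff.of_sameFields`). -/
theorem BookApart.of_sameFields {mem mem' : Mem} {f c : Nat} (h : BookApart mem f c) (sf : Codebook.SameFields mem mem' c) :
    BookApart mem' f c :=
  h.frame sf

/-! ### 32-bit arguments -/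

/-- The SIGNED value of the low 32 bits of a register: a C `int` argument or result, in the form of the walker's branch
hypotheses after a 32-bit signed comparison (`part32_toInt` of Leaves2 turns it into `sint32`: `s32_eq_argInt`). Reducible. -/
abbrev s32 (w : Word) : Int := (Word.part .w32 w).toInt

/-- The SIGNED value of a 64-bit register: a C `long` argument or result. -/
abbrev s64 (w : Word) : Int := (Word.part .w64 w).toInt

/-- The signed value of a 32-bit (`int`) argument register, in the field vocabulary's form. -/
abbrev argInt (r : Word) : Int := sint32 (r.toNat % 2 ^ 32)

/-- The unsigned value of a 32-bit (`uint32`, or non-negative `int`) argument register. -/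
abbrev argU32 (r : Word) : Nat := r.toNat % 2 ^ 32

/-- Unfolds `argInt` (then `sint32_cases` and `omega`). -/
theorem argInt_def (x : Word) : argInt x = sint32 (x.toNat % 2 ^ 32) := id rfl

/-- The two signed views of a 32-bit argument agree. -/
theorem s32_eq_argInt (w : Word) : s32 w = argInt w :=
  part32_toInt w

/-- The 32-bit argument in a register, as a number: the low half. -/
def arg32 (u : State) (r : Reg) : Nat := (u.reg r).toNat % 2 ^ 32

/-- `arg32` unfolded (the form `u_omega` reads; also in the simp set `vspec`, so `v_side` sees through it). -/
@[vspec] theorem arg32_def (u : State) (r : Reg) : arg32 u r = (u.reg r).toNat % 2 ^ 32 := id rfl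

/- `arg32` is unfolded by its rewrite rule only: the frame tactics (`u_same`, `u_omega`) must see an ATOM, not `Nat.mod` applied to
a variable (evaluating it to weak head normal form does not terminate in practice). -/
attribute [irreducible] arg32

/-- A 32-bit argument register holds the NEGATIVE `int` `−k`, `1 ≤ k ≤ 2 ^ 31`: its low half is the two's complement. -/
def IsNeg32 (u : State) (r : Reg) (k : Nat) : Prop := 1 ≤ k ∧ k ≤ 2 ^ 31 ∧ arg32 u r = 2 ^ 32 - k

/-! ### 32-bit `int` arguments in 64-bit pointer arithmetic: the walker's forms as numbers -/

/-- The 64-bit sign extension of a 32-bit value, as a number (`movsxd r64, r32`; `cdqe`). -/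
theorem sext32_toNat (y : BitVec 32) :
    (Word.ofBV (BitVec.signExtend 64 y)).toNat = if y.toNat < 2 ^ 31 then y.toNat else y.toNat + (2 ^ 64 - 2 ^ 32) := by
  unfold Word.ofBV
  rw [UInt64.toNat_ofBitVec, BitVec.setWidth_eq, BitVec.toNat_signExtend]
  simp only [BitVec.toNat_setWidth, BitVec.msb_eq_decide]
  have := y.isLt
  split <;> split <;> simp_all <;> omega

/-- **`movsxd` of a non-negative `int` argument** is the argument. -/
theorem arg32_sext (u : State) (r : Reg) (h : arg32 u r < 2 ^ 31) :
    (Word.ofBV (BitVec.signExtend 64 (Word.part .w32 (u.reg r)))).toNat = arg32 u r := by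
  rw [arg32_def] at h ⊢
  rw [sext32_toNat, part32_toNat, if_pos h]

/-- **`movsxd` of the negative `int` argument `−k`** is `2⁶⁴ − k`: adding it to a pointer subtracts `k`. -/
theorem IsNeg32.sext {u : State} {r : Reg} {k : Nat} (h : IsNeg32 u r k) :
    (Word.ofBV (BitVec.signExtend 64 (Word.part .w32 (u.reg r)))).toNat = 2 ^ 64 - k := by
  obtain ⟨h1, h2, h3⟩ := h
  rw [arg32_def] at h3
  rw [sext32_toNat, part32_toNat, h3, if_neg (by omega)]
  omega

/-- **`sar r32, s` of a non-negative `int` argument** is the division by `2 ^ s` (and the upper half of the register is 0). -/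
theorem arg32_sar (u : State) (r : Reg) (s : Nat) (h : arg32 u r < 2 ^ 31) :
    (Word.ofBV ((Word.part .w32 (u.reg r)).sshiftRight s)).toNat = arg32 u r / 2 ^ s := by
  rw [arg32_def] at h ⊢
  have hm : (Word.part .w32 (u.reg r)).msb = false := by
    rw [BitVec.msb_eq_decide, part32_toNat]
    simp only [decide_eq_false_iff_not, Nat.not_le]
    omega
  unfold Word.ofBV
  rw [UInt64.toNat_ofBitVec, BitVec.toNat_setWidth, BitVec.toNat_sshiftRight_of_msb_false hm, part32_toNat,
    Nat.shiftRight_eq_div_pow]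
  apply Nat.mod_eq_of_lt
  have : (u.reg r).toNat % 2 ^ 32 / 2 ^ s ≤ (u.reg r).toNat % 2 ^ 32 := Nat.div_le_self _ _
  omega

/-- **A pointer plus 4 × a negative `int`** (`lea r, [p + y*4]` with `y` = the sign extension of `−k`): `p − 4 k`, when that is
not negative. -/
theorem add_neg_mul4 (p y : Word) (k : Nat) (hy : y.toNat = 2 ^ 64 - k) (hk1 : 1 ≤ k) (hk : 4 * k ≤ p.toNat) :
    (p + y * 4).toNat = p.toNat - 4 * k := by
  have hp := p.toNat_lt
  have e4 : (4 : Word).toNat = 4 := rfl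
  rw [UInt64.toNat_add, UInt64.toNat_mul, hy, e4]
  omega

/-- **A pointer plus 4 × a non-negative `int`** (`lea r, [p + x*4]`), when nothing wraps. -/
theorem add_mul4 (p x : Word) (i : Nat) (hx : x.toNat = i) (hi : p.toNat + 4 * i < 2 ^ 64) :
    (p + x * 4).toNat = p.toNat + 4 * i := by
  have e4 : (4 : Word).toNat = 4 := rfl
  rw [UInt64.toNat_add, UInt64.toNat_mul, hx, e4]
  omega

/-! ### The bit-level forms the walker leaves in an allocator function, as numbers -/

/-- A field of `*f` as the walker's load reads it (`mov r, [rdi + k]` leaves `u.mem.readLE (u.reg .rdi + k) n`) is the typed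
read of Vorbis/Fields.lean at the number `f + k`. -/
theorem readLE_field (mem : Mem) (w : Word) (k n : Nat) :
    mem.readLE (w + UInt64.ofNat k) n = mem.readLE (addr (w.toNat + k)) n := by
  rw [← addr_add, addr_toNat]

/-- A non-negative `int` sign-extended into a 64-bit register (`movsxd`, `cdqe`) is the number itself. -/
theorem toNat_sext32 (x : BitVec 32) (h : x.toNat < 2 ^ 31) : (Word.ofBV (BitVec.signExtend 64 x)).toNat = x.toNat := by
  unfold Word.ofBV
  simp only [UInt64.toNat_ofBitVec, BitVec.toNat_setWidth, BitVec.toNat_signExtend]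
  have hmsb : x.msb = false := by
    rw [BitVec.msb_eq_decide]
    simp only [decide_eq_false_iff_not, Nat.not_le]
    omega
  simp only [hmsb, Bool.false_eq_true, if_false]
  omega

/-- A non-negative `int` read as a signed number (the walker's form of a signed compare) is the number itself. -/
theorem toInt_of_lt (x : BitVec 32) (h : x.toNat < 2 ^ 31) : x.toInt = (x.toNat : Int) := by
  rw [BitVec.toInt_eq_toNat_cond]
  have : 2 * x.toNat < 2 ^ 32 := by omega
  simp only [this, if_true]

/-- A number below 2^32 as a 32-bit vector. -/
theorem toNat_ofNat32 (n : Nat) (h : n < 2 ^ 32) : (BitVec.ofNat 32 n).toNat = n := by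
  rw [BitVec.toNat_ofNat]
  exact Nat.mod_eq_of_lt h

/-- **The walker's form of `lea r32, [sz + 7] ; and r32, 0xfffffff8`** is `r8`, for a size that passed FIX A's first test. -/
theorem r8_lea (x : BitVec 32) (h : x.toNat ≤ 0x7FFFFFF8) :
    (BitVec.setWidth 32 (Word.ofBV x + 7).toBitVec &&& 4294967288#32).toNat = r8 x.toNat := by
  have e : BitVec.setWidth 32 (Word.ofBV x + 7).toBitVec = x + 7#32 := by
    apply BitVec.eq_of_toNat_eq
    have e7 : (7 : Word).toNat = 7 := rfl
    rw [BitVec.toNat_setWidth, UInt64.toNat_toBitVec, UInt64.toNat_add, toNat_ofBV32, e7, BitVec.toNat_add]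
    have e7' : (7#32).toNat = 7 := by decide
    rw [e7']
    omega
  rw [e]
  exact r8_bv x h


/-- The 32-bit difference of two numbers in order (`sub r32, [m32]` with `temp_offset − setup_offset`). -/
theorem toNat_sub32 (a b : Nat) (h : b ≤ a) (ha : a < 2 ^ 32) : (BitVec.ofNat 32 a - BitVec.ofNat 32 b).toNat = a - b := by
  rw [BitVec.toNat_sub, BitVec.toNat_ofNat, BitVec.toNat_ofNat]
  have e1 : a % 2 ^ 32 = a := Nat.mod_eq_of_lt ha
  have e2 : b % 2 ^ 32 = b := Nat.mod_eq_of_lt (by omega)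
  rw [e1, e2]
  omega

/-- The walker's form of `lea r32, [r14 + r12 + 0x20]`: the low half of the 64-bit sum of two zero-extended 32-bit values and 32. -/
theorem toNat_lea32 (x y : BitVec 32) :
    (BitVec.setWidth 32 (Word.ofBV x + Word.ofBV y + 32).toBitVec).toNat = (x.toNat + y.toNat + 32) % 2 ^ 32 := by
  have e32 : (32 : Word).toNat = 32 := rfl
  rw [BitVec.toNat_setWidth, UInt64.toNat_toBitVec, UInt64.toNat_add, UInt64.toNat_add, toNat_ofBV32, toNat_ofBV32, e32]
  have := x.isLt
  have := y.isLt
  omega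

/-! ### 32-bit counters and small `int` locals (lemmas that several farm workers had each written)

  § 32-BIT COUNTERS. A C `int` loop counter (`for (int i = 0; i < n; ++i)`) or a small `int` local is generalised in a proof as the word
  `UInt64.ofNat i` with `i < 2 ^ 31`. The walker then leaves these forms, for which the tree had lemmas only when the value is a register of
  the ENTRY state (`arg32_sext`, `arg32_sar`):

      Word.part .w32 (UInt64.ofNat i)                                        the register's low half      cnt32_part  cnt32_part_toNat  cnt32_part_toInt
      BitVec.ofNat 32 i                                                      a dword loaded from a slot   cnt32_toInt  cnt32_ofBV
      Word.ofBV (BitVec.signExtend 64 (Word.part .w32 (UInt64.ofNat i)))     `movsxd r64, r32`            cnt32_sext  cnt32_sext_toNat  (cnt32_sext_bv for a slot)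
      Word.ofBV (Word.part .w32 (UInt64.ofNat i) + 1#32)                     `add r32, 1`                 cnt32_succ  (cnt32_succ_bv for a slot, cnt32_add for `+ c`)
      p + Word.ofBV (BitVec.signExtend 64 (Word.part .w32 (UInt64.ofNat i))) * 4   `lea [p + rax*4]`      cnt32_elem4  cnt32_elem8
      BitVec.ofNat 32 (x.toNat % 4294967296)                                 a dword spilled and reloaded bv32_reload_eq

  HOW TO USE: the `Word` EQUATIONS (`cnt32_sext i hi`, `cnt32_part i`, `cnt32_ofBV i hi`) go into the facts list of the walker,
  `u_walk hcode [hμ.vendor, cnt32_sext i hi]`, so that every later address speaks of `UInt64.ofNat i`; the `toNat` / `toInt` forms are for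
  `rw … at hbr_<addr>` (a branch hypothesis `(Word.part .w32 (UInt64.ofNat i)).toInt < (BitVec.ofNat 32 n).toInt`).
-/

/-- The low half of a register that holds the number `i`, as a 32-bit vector: `BitVec.ofNat 32 i` (no bound needed: `2 ^ 32` divides `2 ^ 64`).
Written by decode_residue.3 (`part32_ofNat`). -/
theorem cnt32_part (i : Nat) : Word.part .w32 (UInt64.ofNat i) = BitVec.ofNat 32 i := by
  apply BitVec.eq_of_toNat_eq
  have e : (BitVec.ofNat 32 i).toNat = i % 2 ^ 32 := BitVec.toNat_ofNat i 32
  have e2 : i % 2 ^ 64 % 2 ^ 32 = i % 2 ^ 32 := by omega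
  rw [Vorbis.toNat_part32, UInt64.toNat_ofNat']
  exact e2.trans e.symm

/-- The low half of a register that holds a number below `2 ^ 32`, as a number. Written by 10 units (`part32_ofNat`, `counter_part`,
`part32_ofNat_toNat`, `part32_counter`, `part32_small`). -/
theorem cnt32_part_toNat (i : Nat) (h : i < 2 ^ 32) : (Word.part .w32 (UInt64.ofNat i)).toNat = i := by
  rw [Vorbis.toNat_part32, UInt64.toNat_ofNat']
  omega

/-- A number below `2 ^ 31` as a signed 32-bit value is itself (`Segment.toInt_small` of ReaderLemmas.lean, which most units do not import).
Written by 9 units (`toInt_counter32`, `toInt_small`, `ofNat32_toInt`, `toInt_ofNat32`, `toInt32_ofNat`, `toInt_small32` …). -/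
theorem cnt32_toInt (i : Nat) (h : i < 2 ^ 31) : (BitVec.ofNat 32 i).toInt = (i : Int) := by
  have e : (BitVec.ofNat 32 i).toNat = i := toNat_ofNat32 i (by omega)
  rw [toInt_of_lt _ (by omega), e]

/-- The low half of a register that holds a number below `2 ^ 31`, read as a signed number: what a `cmp r32, …; jl/jg` compares.
Written by 10 units (`part32_ofNat_toInt`, `counter_toInt`, `part32_toInt_small`). -/
theorem cnt32_part_toInt (i : Nat) (h : i < 2 ^ 31) : (Word.part .w32 (UInt64.ofNat i)).toInt = (i : Int) := by
  rw [cnt32_part, cnt32_toInt i h]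

/-- A dword below `2 ^ 32` written to a 64-bit register (`mov r32, [m32]`, zero-extended) is the number.
Written by 5 units (`ofBV_ofNat32`, `ofBV32_of_lt`, `word_of_dword`, `zext32_small`, `ofBV_ofNat32_lt`). -/
theorem cnt32_ofBV (i : Nat) (h : i < 2 ^ 32) : Word.ofBV (BitVec.ofNat 32 i) = UInt64.ofNat i := by
  apply UInt64.toNat_inj.mp
  rw [Vorbis.toNat_ofBV32, BitVec.toNat_ofNat, UInt64.toNat_ofNat']
  omega

/-- `movsxd r64, [m32]` of a dword below `2 ^ 31`: the number. Written by 4 units (`sext_ofNat32`, `sx32_ofNat`, `sx_ofNat`). -/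
theorem cnt32_sext_bv (i : Nat) (h : i < 2 ^ 31) : Word.ofBV (BitVec.signExtend 64 (BitVec.ofNat 32 i)) = UInt64.ofNat i := by
  have e : (BitVec.ofNat 32 i).toNat = i := toNat_ofNat32 i (by omega)
  apply UInt64.toNat_inj.mp
  rw [toNat_sext32 _ (by omega), e, UInt64.toNat_ofNat']
  omega

/-- `movsxd r64, r32` of a register that holds a number below `2 ^ 31`: the same register value. THE rewrite rule for the facts list of
`u_walk`. Written by 10 units (`sext_ofNat`, `sext_small`, `sx_part`, `sext_counter`). -/
theorem cnt32_sext (i : Nat) (h : i < 2 ^ 31) :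
    Word.ofBV (BitVec.signExtend 64 (Word.part .w32 (UInt64.ofNat i))) = UInt64.ofNat i := by
  rw [cnt32_part, cnt32_sext_bv i h]

/-- The `toNat` form of `cnt32_sext`. Written by 2 units (`sx32_ofNat`, `sext_counter`). -/
theorem cnt32_sext_toNat (i : Nat) (h : i < 2 ^ 31) :
    (Word.ofBV (BitVec.signExtend 64 (Word.part .w32 (UInt64.ofNat i)))).toNat = i := by
  rw [cnt32_sext i h, UInt64.toNat_ofNat']
  omega

/-- `add dword [m32], 1` / `add r32, 1` on a 32-bit vector that is a number. Written by 4 units (`ofNat_succ32`, `ofNat32_succ`,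
`ofNat_add_one`, `ebp_inc`). -/
theorem cnt32_succ_bv (i : Nat) : BitVec.ofNat 32 i + 1#32 = BitVec.ofNat 32 (i + 1) := by
  rw [BitVec.ofNat_add]

/-- The number after `add dword [m32], 1`. Written by 3 units (`inc32_toNat`, `slot_succ`, `incmem32_toNat`). -/
theorem cnt32_succ_bv_toNat (i : Nat) (h : i + 1 < 2 ^ 32) : (BitVec.ofNat 32 i + 1#32).toNat = i + 1 := by
  rw [cnt32_succ_bv, toNat_ofNat32 (i + 1) h]

/-- `add r32, c` on a register that holds a number: the sum (no wrap). Written by 2 units (`add32_ofNat`). -/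
theorem cnt32_add (i c : Nat) (h : i + c < 2 ^ 32) :
    Word.ofBV (Word.part .w32 (UInt64.ofNat i) + BitVec.ofNat 32 c) = UInt64.ofNat (i + c) := by
  rw [cnt32_part, ← BitVec.ofNat_add, cnt32_ofBV (i + c) h]

/-- `++i` (`add r32, 1`) on a register that holds the counter `i`: the register holds `i + 1`. The latch of every counted loop.
Written by 11 units (`succ_ofNat`, `inc32_ofNat`, `counter_inc`, `counter_succ`, `incReg32`, `counter_succ32`, `add1_small`, `succ_counter`,
`inc_ofNat`, `inc32_word`). -/
theorem cnt32_succ (i : Nat) (h : i + 1 < 2 ^ 32) :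
    Word.ofBV (Word.part .w32 (UInt64.ofNat i) + 1#32) = UInt64.ofNat (i + 1) :=
  cnt32_add i 1 h

/-- `&p[i]` for 4-byte elements (`movsxd rax, r32 ; lea r, [p + rax*4]`) with the counter `i` in the register: `p + 4 i`.
Written by 3 units (`elem_addr`, `addr_out`, `lea1_toNat`). -/
theorem cnt32_elem4 (p : Word) (i : Nat) (hi : i < 2 ^ 31) (hp : p.toNat + 4 * i < 2 ^ 64) :
    (p + Word.ofBV (BitVec.signExtend 64 (Word.part .w32 (UInt64.ofNat i))) * 4).toNat = p.toNat + 4 * i :=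
  add_mul4 p _ i (cnt32_sext_toNat i hi) hp

/-- `&p[i]` for 8-byte elements (`movsxd rax, r32 ; lea r, [p + rax*8]`): `p + 8 i`. Written by 2 units (`chan_slot`, `addr_table`). -/
theorem cnt32_elem8 (p : Word) (i : Nat) (hi : i < 2 ^ 31) (hp : p.toNat + 8 * i < 2 ^ 64) :
    (p + Word.ofBV (BitVec.signExtend 64 (Word.part .w32 (UInt64.ofNat i))) * 8).toNat = p.toNat + 8 * i := by
  have e8 : (8 : Word).toNat = 8 := rfl
  rw [UInt64.toNat_add, UInt64.toNat_mul, cnt32_sext_toNat i hi, e8]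
  omega

/-- A dword spilled to the stack and reloaded through a register (`mov [rsp+8], edx … movsxd rax, [rsp+8]`): the walker's form of the
reloaded value is the value. (`UserX.bv32_ofNat_toNat` is the form without the `%`.) Written by 3 units (`reload32_eq`,
`bv32_ofNat_toNat_mod` of vorbis_finish_frame, `ofNat_toNat32_mod`). -/
theorem bv32_reload_eq (x : BitVec 32) : BitVec.ofNat 32 (x.toNat % 4294967296) = x := by
  apply BitVec.eq_of_toNat_eq
  rw [BitVec.toNat_ofNat]
  omega

/-- The signed value of a 32-bit quantity, by cases: what turns a `.toInt` branch hypothesis into arithmetic for `omega`.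
Written by 2 units (`toInt32_cases`, `toInt_cases32`). -/
theorem bv32_toInt_cases (x : BitVec 32) :
    (x.toNat < 2 ^ 31 ∧ x.toInt = (x.toNat : Int)) ∨ (2 ^ 31 ≤ x.toNat ∧ x.toInt = (x.toNat : Int) - 2 ^ 32) := by
  rw [BitVec.toInt_eq_toNat_cond]
  have := x.isLt
  split
  · left
    omega
  · right
    omega

/-- A 32-bit result written to a 64-bit register is below `2 ^ 32` (a post `rax < 2 ^ 32`; `GetBits.ofBV32_toNat` of ReaderLemmas.lean is
the equation). Written by 2 units (`ofBV32_lt`). -/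
theorem ofBV32_toNat_lt (x : BitVec 32) : (Word.ofBV x).toNat < 2 ^ 32 := by
  rw [Vorbis.toNat_ofBV32]
  exact x.isLt

/-- `(w − k).toNat = w.toNat − k` for a number `k` not above `w` (`rsp − 3000`, a slot address). Written by 2 units (`rsp_sub_toNat`,
`word_sub_toNat`). -/
theorem word_sub_toNat_le (w : Word) (k : Nat) (hk : k ≤ w.toNat) : (w - UInt64.ofNat k).toNat = w.toNat - k := by
  have hlt : k < 2 ^ 64 := by
    have := w.toNat_lt
    omega
  have hle : UInt64.ofNat k ≤ w := by
    rw [UInt64.le_iff_toNat_le, UInt64.toNat_ofNat', Nat.mod_eq_of_lt hlt]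
    exact hk
  rw [UInt64.toNat_sub_of_le _ _ hle, UInt64.toNat_ofNat', Nat.mod_eq_of_lt hlt]

/-! ### § shifts of a sign-extended `int` (`movsxd r, [m32] ; shl r, k`) -/

/-- `movsxd r, r32 ; shl r, k` of a register whose value is a non-negative `int` (`x < 2 ^ 31`), as a number: `x · 2 ^ k` (`k ≤ 5`:
strides 2 … 32). Written by vorbis_deinit.1 (`sext_shl`); the `k = 2` case by 3 more units. -/
theorem cnt32_sext_shl (x : Word) (k : Nat) (hk : k ≤ 5) (h : x.toNat < 2 ^ 31) :
    (Word.ofBV (BitVec.signExtend 64 (Word.part .w32 x)) <<< (UInt64.ofNat k)).toNat = x.toNat * 2 ^ k := by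
  have hp : (Word.part .w32 x).toNat = x.toNat := by
    rw [Vorbis.toNat_part32]
    omega
  have hs := toNat_sext32 (Word.part .w32 x) (by omega)
  rw [hp] at hs
  have hk64 : (UInt64.ofNat k).toNat % 64 = k := by
    rw [UInt64.toNat_ofNat']
    omega
  rw [UInt64.toNat_shiftLeft, hs, hk64, Nat.shiftLeft_eq]
  have h2 : 2 ^ k ≤ 2 ^ 5 := Nat.pow_le_pow_right (by decide) hk
  have h3 : x.toNat * 2 ^ k ≤ x.toNat * 2 ^ 5 := Nat.mul_le_mul_left _ h2
  apply Nat.mod_eq_of_lt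
  omega

/-- `movsxd rax, [m32] ; shl rax, 2` for a non-negative `int` `m` loaded from a slot: the byte offset `4 m`. Written by 4 units
(`sext_shl2` of imdct_step3_inner_r_loop.2, `sext32_shl2_toNat` of inverse_mdct.3, `shl2_n` of decode_residue.2, `sext_shl`). -/
theorem cnt32_sext_bv_shl2 (m : Nat) (h : m < 2 ^ 31) :
    (Word.ofBV (BitVec.signExtend 64 (BitVec.ofNat 32 m)) <<< 2).toNat = 4 * m := by
  have e3 : (2 : UInt64).toNat % 64 = 2 := by decide
  rw [cnt32_sext_bv m h, UInt64.toNat_shiftLeft, UInt64.toNat_ofNat', e3, Nat.shiftLeft_eq]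
  omega

/-! ### § `int` arguments that are small numbers -/

/-- A number below `2 ^ 31` in a register, read as an `int` argument (`argInt`): the number. Written by 3 units (`argInt_ofNat`,
`result_i`, `argInt_addr`). -/
theorem cnt32_argInt (i : Nat) (h : i < 2 ^ 31) : argInt (UInt64.ofNat i) = (i : Int) := by
  have e : (UInt64.ofNat i).toNat % 2 ^ 32 = i := by
    rw [UInt64.toNat_ofNat']
    omega
  unfold argInt
  rw [e]
  have hc := sint32_cases i
  omega

/-- `mov r32, 0xffffffff`: the `int` −1 (the "end of packet" result of the codebook decoders). Written by 2 units (`argInt_m1`,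
`result_m1`). -/
theorem argInt_neg_one : argInt (Word.ofBV 0xffffffff#32) = -1 := by
  decide

/-! ### § `cdq ; idiv r/m32` (8 sites in the image): no `#DE` -/

end Vorbis.Spec

/-! ### A narrower read of a wider store (namespace `X86.User.Mem`; from the farm workers)

  § A NARROWER READ OF A WIDER STORE. `mov [rsp+4], r8d … movzx eax, byte [rsp+4]` (an `int` spilled, its low byte reloaded), `push r ;
  mov eax, [rsp]` (the 7th argument of imdct_step3_inner_s_loop: a dword read of a pushed qword): neither the walker nor `u_read` /
  `u_resolve` reads a PREFIX of a store; the load stays `(nest).readLE a k` inside later values. Rewrite `w_mem` / the hypothesis with these.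
-/
namespace X86.User.Mem
open Vorbis

/-- The low `k` bytes of a little-endian read of `k + j` bytes. Written by inverse_mdct.7 (`readLE_low`); add_entry (`readLE1_writeLE`) and
vorbis_init (`readLE_byte`, `readLE_copy_part`) proved instances by hand. -/
theorem readLE_prefix (f : Mem) (a : Word) (k j : Nat) : f.readLE a k = f.readLE a (k + j) % 256 ^ k := by
  induction k generalizing a with
  | zero =>
    rw [Nat.pow_zero, Nat.mod_one]
    rfl
  | succ k ih =>
    have e : k + 1 + j = (k + j) + 1 := by omega
    rw [e]
    simp only [Mem.readLE]
    rw [ih (a + 1), Nat.pow_succ, Nat.mul_comm (256 ^ k) 256, Nat.mod_mul]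
    have hb : (f.read a).toNat < 256 := UInt8.toNat_lt _
    have e1 : ((f.read a).toNat + 256 * f.readLE (a + 1) (k + j)) % 256 = (f.read a).toNat := by
      omega
    have e2 : ((f.read a).toNat + 256 * f.readLE (a + 1) (k + j)) / 256 = f.readLE (a + 1) (k + j) := by
      omega
    rw [e1, e2]

/-- A `k`-byte read of an `n`-byte store at the same address, `k ≤ n`: the low `k` bytes of the stored value. -/
theorem readLE_writeLE_prefix (f : Mem) (a : Word) (k n v : Nat) (hk : k ≤ n) (hn : n ≤ 2 ^ 64) :
    (f.writeLE a n v).readLE a k = v % 256 ^ n % 256 ^ k := by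
  obtain ⟨j, rfl⟩ : ∃ j, n = k + j := ⟨n - k, by omega⟩
  rw [readLE_prefix _ a k j, Mem.readLE_writeLE_same _ _ _ _ hn]

/-- A dword read of a qword just stored at the same address (`push r64 ; mov r32, [rsp]`). Written by inverse_mdct.7 (`readLE4_writeLE8`). -/
theorem readLE4_of_writeLE8 (f : Mem) (a : Word) (x : Nat) (hx : x < 2 ^ 32) : (f.writeLE a 8 x).readLE a 4 = x := by
  rw [readLE_prefix _ a 4 4, Mem.readLE_writeLE_same _ _ _ _ (by decide)]
  omega

/-- A byte read of a dword just stored at the same address (`mov [m], r32 ; movzx eax, byte [m]`): the low byte. Written by add_entry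
(`readLE1_writeLE4`). -/
theorem readLE1_of_writeLE4 (f : Mem) (a : Word) (v : Nat) : (f.writeLE a 4 v).readLE a 1 = v % 256 := by
  rw [readLE_prefix _ a 1 3, Mem.readLE_writeLE_same _ _ _ _ (by decide)]
  omega

/-- The low byte of a dword slot whose value is a byte (`movzx ecx, BYTE PTR [rbp-0x48]` of an `int` slot). Written by inverse_mdct.7
(`readLE1_of_readLE4`). -/
theorem readLE1_of_readLE4_lt (f : Mem) (a : Word) (x : Nat) (h : f.readLE a 4 = x) (hx : x < 256) : f.readLE a 1 = x := by
  rw [readLE_prefix _ a 1 3, h]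
  omega

end X86.User.Mem

/-! ### The walker's shadow addresses (namespace `Asan`; from the farm workers)

  § THE WALKER'S SHADOW ADDRESSES. A shadow store of the instrumented code is `mov [r + 0xC00000 + k], imm` with the granule in `r`: the
  walker's address is `UInt64.ofNat g + (0xC00000 + k)`, the invariants speak of `shadowAddr (g + k)` (`storesMem`, `fillMem`,
  `ShadowInv.prologue_ra / epilogue_ra`). Five units wrote the bridge.
-/
namespace Asan
open X86 X86.User

/-- The shadow byte of granule `g + k`, as the word the walker computes for `[r + 0xC00000 + k]` with `r = g`. With it the walker's nest of
shadow stores is `storesMem mem g F.prologue` / `F.epilogue`: `unfold storesMem <layout>; simp only [List.foldl_cons, List.foldl_nil,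
shadowAddr_granule_add]; rfl`. Written by vorbis_decode_packet_rest.15 (`shadowAddr_word`), decode_residue.11, vorbis_decode_packet_rest.1
(`shadowAddr_frame`). -/
theorem shadowAddr_granule_add (g k : Nat) : shadowAddr (g + k) = UInt64.ofNat g + UInt64.ofNat (0xC00000 + k) := by
  unfold shadowAddr
  rw [← UInt64.ofNat_add]
  congr 1
  omega

/-- The address `g + C00000H` with the granule `g` in a register is the shadow address of granule `g` (the loop bodies of `arena_poison` /
`arena_unpoison`). Written by arena_unpoison (`shadowAddr_eq`) and arena_poison (inside `store_eq`). -/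
theorem shadowAddr_of_granule (g : Nat) : UInt64.ofNat g + 12582912 = shadowAddr g := by
  unfold shadowAddr
  rw [Nat.add_comm, UInt64.ofNat_add]
  rfl

/-- `fillMem` with one more granule, the LAST store outermost (its definition has the first store innermost): the step of a loop that fills
in ascending order. Written by arena_poison (`fillMem_succ`) and arena_unpoison (`fillMem_snoc`). -/
theorem fillMem_last (mem : Mem) (g : Nat) (v : Byte) (k : Nat) :
    fillMem mem g v (k + 1) = (fillMem mem g v k).write (shadowAddr (g + k)) v := by
  induction k generalizing mem g with
  | zero => rfl
  | succ k ih =>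
    have e : g + (k + 1) = g + 1 + k := by omega
    rw [fillMem, ih, e]
    rfl

end Asan
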